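-- pv_equiv track=rewrite | github.com/CyrusKashef/Banjo_Tooie_Sandbox | sandbox/patching/compression_class.py | _generate_cic_result
-- ===== SOURCE A (Python) =====
-- def _generate_cic_result(
--         chl:list, rsp:list, list_len:int):
--     '''
--     Pass
--     '''
--     key = 0xB
--     lut0 = [
--         0x4, 0x7, 0xA, 0x7, 0xE, 0x5, 0xE, 0x1,
--         0xC, 0xF, 0x8, 0xF, 0x6, 0x3, 0x6, 0x9
--     ]
--     lut1 = [
--         0x4, 0x1, 0xA, 0x7, 0xE, 0x5, 0xE, 0x1,
--         0xC, 0x9, 0x8, 0x5, 0x6, 0x3, 0xC, 0x9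
--     ]
--     lut = lut0
--     for i in range(list_len):
--         rsp[i] = ((key + 5 * chl[i]) & 0xF)
--         key = lut[rsp[i]]
--         sgn = (rsp[i] >> 3) & 0x1
--         if(sgn == 1):
--             mag = rsp[i]
--         else:
--             mag = rsp[i] & 0x7
--         if(mag % 3 == 1):
--             mod = sgn
--         else:
--             mod = 1 - sgn
--         if(lut == lut1 and (rsp[i] == 0x1 or rsp[i] == 0x9)):
--             mod = 1
--         if(lut == lut1 and (rsp[i] == 0xB or rsp[i] == 0xE)):
--             mod = 0
--         if(mod == 1):
--             lut = lut1
--         else: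
--             lut = lut0
--     return rsp
-- ===== SOURCE B (Python) =====
-- _LUT0 = [
--     0x4, 0x7, 0xA, 0x7, 0xE, 0x5, 0xE, 0x1,
--     0xC, 0xF, 0x8, 0xF, 0x6, 0x3, 0x6, 0x9
-- ]
-- _LUT1 = [
--     0x4, 0x1, 0xA, 0x7, 0xE, 0x5, 0xE, 0x1,
--     0xC, 0x9, 0x8, 0x5, 0x6, 0x3, 0xC, 0x9
-- ]
--
--
-- def _next_state(s, c):
--     """Next combined state from state s = cur*16 + key and challenge nibble c."""
--     r = (s + 5 * c) & 0xF
--     cur = s >> 4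
--     key = (_LUT1 if cur else _LUT0)[r]
--     sgn = r >> 3
--     mag = r if sgn else r & 0x7
--     mod = sgn if mag % 3 == 1 else 1 - sgn
--     if cur and (r == 0x1 or r == 0x9):
--         mod = 1
--     if cur and (r == 0xB or r == 0xE):
--         mod = 0
--     return (mod << 4) | key
--
--
-- # full 32x16 next-state table over the combined (cur, key) state space
-- _STEP = [[_next_state(s, c) for c in range(16)] for s in range(32)]
--
--
-- def _generate_cic_result(
--         chl: list, rsp: list, list_len: int):
--     '''
--     Two staged passes over the combined 32-state space instead of one
--     interleaved branchy loop: stage 1 scans the challenges through the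
--     precomputed _STEP table collecting the state before each step; stage 2
--     derives each response arithmetically from that state sequence alone.
--     '''
--     states = [0xB]
--     for x in chl[:list_len]:
--         states.append(_STEP[states[-1]][x & 0xF])
--     for i in range(list_len):
--         rsp[i] = (states[i] + 5 * chl[i]) & 0xF
--     return rsp
-- ===== Notes on version B (the rewrite author's own statement) =====
-- stated objective: alternative
-- what changed: A's single interleaved loop (write rsp[i], branchy sgn/mag/mod cascade, LUT-identity comparison) is replaced by two staged passes: a scan of the challenges through a precomputed 32x16 next-state table over the combined (cur,key) state space collecting the state sequence, then an independent elementwise pass deriving each rsp[i] arithmetically from states[i] and chl[i] alone.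
import Mathlib
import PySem

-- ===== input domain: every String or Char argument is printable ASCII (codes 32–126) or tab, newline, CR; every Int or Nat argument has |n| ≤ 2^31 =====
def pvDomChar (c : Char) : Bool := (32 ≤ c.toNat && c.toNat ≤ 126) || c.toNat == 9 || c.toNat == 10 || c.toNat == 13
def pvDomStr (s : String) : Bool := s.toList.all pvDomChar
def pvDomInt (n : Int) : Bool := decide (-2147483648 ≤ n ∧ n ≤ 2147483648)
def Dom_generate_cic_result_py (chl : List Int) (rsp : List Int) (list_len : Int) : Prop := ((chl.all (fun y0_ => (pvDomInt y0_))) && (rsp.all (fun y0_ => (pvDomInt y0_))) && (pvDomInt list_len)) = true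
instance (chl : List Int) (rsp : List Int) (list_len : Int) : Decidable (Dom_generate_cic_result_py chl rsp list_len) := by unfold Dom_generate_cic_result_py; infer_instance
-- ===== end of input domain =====

-- B replaces A's single interleaved branchy loop by two staged passes over a combined
-- 32-value (cur,key) state space: a state scan through a precomputed 32x16 next-state table,
-- then an independent elementwise pass deriving each response arithmetically from the state
-- sequence (objective: alternative, same asymptotic cost). A mutates rsp in place and returns it; the
-- equivalence proved here is about the return value.

-- ===== PORT A =====
def pvLut0 : List Int := [0x4, 0x7, 0xA, 0x7, 0xE, 0x5, 0xE, 0x1, 0xC, 0xF, 0x8, 0xF, 0x6, 0x3, 0x6, 0x9]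
def pvLut1 : List Int := [0x4, 0x1, 0xA, 0x7, 0xE, 0x5, 0xE, 0x1, 0xC, 0x9, 0x8, 0x5, 0x6, 0x3, 0xC, 0x9]

-- the sgn/mag/mod branch cascade of A's loop body: from the active lut and the nibble v,
-- the lut active in the next iteration
def pvCascade (lut : List Int) (v : Int) : List Int :=
  let sgn := PySem.Int.band (v >>> (3 : Nat)) 1
  let mag := if sgn == 1 then v else PySem.Int.band v 7
  let md0 := if PySem.Int.mod mag 3 == 1 then sgn else 1 - sgn
  let md1 := if lut == pvLut1 && (v == 0x1 || v == 0x9) then 1 else md0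
  let md2 := if lut == pvLut1 && (v == 0xB || v == 0xE) then 0 else md1
  if md2 == 1 then pvLut1 else pvLut0

def pvStepA (chl : List Int) (st : Int × List Int × List Int) (i : Int) : Int × List Int × List Int :=
  match st with
  | (key, lut, out) =>
    let v := PySem.Int.band (key + 5 * PySem.List.pyGetD chl i 0) 0xF
    (PySem.List.pyGetD lut v 0, pvCascade lut v, PySem.List.pySetD out i v)

def generate_cic_result_py (chl : List Int) (rsp : List Int) (list_len : Int) : List Int :=
  ((PySem.List.pyRange 0 list_len 1).foldl (pvStepA chl) (0xB, pvLut0, rsp)).2.2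

-- ===== PORT B =====
-- _next_state of Source B: next combined state from state s = cur*16 + key and nibble c
def pvNextState (s c : Int) : Int :=
  let r := PySem.Int.band (s + 5 * c) 0xF
  let cur := s >>> (4 : Nat)
  let key := PySem.List.pyGetD (if cur ≠ 0 then pvLut1 else pvLut0) r 0
  let sgn := r >>> (3 : Nat)
  let mag := if sgn ≠ 0 then r else PySem.Int.band r 0x7
  let md0 := if PySem.Int.mod mag 3 == 1 then sgn else 1 - sgn
  let md1 := if cur ≠ 0 ∧ (r = 0x1 ∨ r = 0x9) then 1 else md0
  let md2 := if cur ≠ 0 ∧ (r = 0xB ∨ r = 0xE) then 0 else md1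
  PySem.Int.bor (md2 <<< (4 : Nat)) key

-- _STEP: the full 32x16 next-state table
def pvStepTbl : List (List Int) :=
  (List.range 32).map (fun s => (List.range 16).map (fun c => pvNextState (s : Int) (c : Int)))

-- body of Source B's stage-1 loop: states.append(_STEP[states[-1]][x & 0xF])
def pvStepScan (st : List Int) (x : Int) : List Int :=
  st ++ [PySem.List.pyGetD (PySem.List.pyGetD pvStepTbl (PySem.List.pyGetD st (-1) 0) [])
          (PySem.Int.band x 0xF) 0]

-- body of Source B's stage-2 loop: rsp[i] = (states[i] + 5 * chl[i]) & 0xF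
def pvStep2 (chl states out : List Int) (i : Int) : List Int :=
  PySem.List.pySetD out i
    (PySem.Int.band (PySem.List.pyGetD states i 0 + 5 * PySem.List.pyGetD chl i 0) 0xF)

def generate_cic_result_py_alt (chl : List Int) (rsp : List Int) (list_len : Int) : List Int :=
  let states := (PySem.List.slice chl none (some list_len)).foldl pvStepScan [0xB]
  (PySem.List.pyRange 0 list_len 1).foldl (pvStep2 chl states) rsp

-- ===== PRECONDITION & SPEC =====
-- Pre_ excludes exactly the inputs where A raises IndexError: chl[i] / rsp[i] with i < list_len out of range.
def Pre_generate_cic_result_py (chl : List Int) (rsp : List Int) (list_len : Int) : Prop :=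
  list_len ≤ (chl.length : Int) ∧ list_len ≤ (rsp.length : Int)
instance (chl : List Int) (rsp : List Int) (list_len : Int) : Decidable (Pre_generate_cic_result_py chl rsp list_len) := by unfold Pre_generate_cic_result_py; infer_instance

def pvWitness_generate_cic_result_py : List Int × List Int × Int := ([3, -2, 7], [0, 0, 0], 3)

def Spec_generate_cic_result_py (chl : List Int) (rsp : List Int) (list_len : Int) (out : List Int) : Prop := out = generate_cic_result_py_alt chl rsp list_len
instance (chl : List Int) (rsp : List Int) (list_len : Int) (out : List Int) : Decidable (Spec_generate_cic_result_py chl rsp list_len out) := by unfold Spec_generate_cic_result_py; infer_instance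

-- ===== CLAIM (what is proved, stated in full; the proofs are below) =====
def Claim_equal_generate_cic_result_py : Prop := ∀ (chl : List Int) (rsp : List Int) (list_len : Int), Dom_generate_cic_result_py chl rsp list_len → Pre_generate_cic_result_py chl rsp list_len → Spec_generate_cic_result_py chl rsp list_len (generate_cic_result_py chl rsp list_len)

-- ===== LEMMAS AND PROOFS =====

-- Python's  a & 15  is  a mod 16 (floor mod), for every integer a
theorem pv_band15 (a : Int) : PySem.Int.band a 15 = a % 16 := by
  have h15 : ∀ m : Nat, m &&& 15 = m % 16 := fun m => by
    have := Nat.and_two_pow_sub_one_eq_mod m 4; norm_num at this; omega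
  unfold PySem.Int.band
  split_ifs with h1 <;> simp_all
  · rw [Nat.and_comm, h15]; omega

-- the low nibble of key + 5*x only depends on x's low nibble
theorem pv_band15_shift (a x : Int) :
    PySem.Int.band (a + 5 * x) 15 = PySem.Int.band (a + 5 * PySem.Int.band x 15) 15 := by
  simp only [pv_band15]; omega

-- the single-step table lookup of Source B's stage 1
def pvF (s x : Int) : Int :=
  PySem.List.pyGetD (PySem.List.pyGetD pvStepTbl s []) (PySem.Int.band x 0xF) 0

-- the state sequence Source B's stage-1 loop appends after the initial 0xB
def pvScan (s : Int) : List Int → List Int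
  | [] => []
  | x :: xs => pvF s x :: pvScan (pvF s x) xs

theorem pv_foldl_scan (xs : List Int) : ∀ (st : List Int), st ≠ [] →
    xs.foldl pvStepScan st = st ++ pvScan (PySem.List.pyGetD st (-1) 0) xs := by
  induction xs with
  | nil => intro st _; simp [pvScan]
  | cons x xs ih =>
    intro st hst
    have hstep : pvStepScan st x = st ++ [pvF (PySem.List.pyGetD st (-1) 0) x] := rfl
    rw [List.foldl_cons, hstep, ih _ (by simp),
        PySem.List.pyGetD_neg_one_append_singleton]
    simp [pvScan]

theorem pvScan_getD_succ : ∀ (xs : List Int) (s : Int) (k : Nat), k < xs.length →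
    (s :: pvScan s xs).getD (k + 1) 0 = pvF ((s :: pvScan s xs).getD k 0) (xs.getD k 0) := by
  intro xs
  induction xs with
  | nil => intro s k hk; simp at hk
  | cons x xs ih =>
    intro s k hk
    cases k with
    | zero => simp [pvScan]
    | succ k =>
      have := ih (pvF s x) k (by simpa using hk)
      simpa [pvScan] using this

-- the table encodes exactly one step of A's cascade, for combined state s and nibble c
theorem pv_tbl (s c : Int) (hs0 : 0 ≤ s) (hs1 : s < 32) (hc0 : 0 ≤ c) (hc1 : c < 16) :
    PySem.List.pyGetD (PySem.List.pyGetD pvStepTbl s []) c 0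
      = (if pvCascade (if s < 16 then pvLut0 else pvLut1) (PySem.Int.band (s + 5 * c) 15) = pvLut1
          then 16 else 0)
        + PySem.List.pyGetD (if s < 16 then pvLut0 else pvLut1) (PySem.Int.band (s + 5 * c) 15) 0 := by
  interval_cases s <;> interval_cases c <;> decide

-- lut values are nibbles
theorem pv_lut_bounds (lut : List Int) (hl : lut = pvLut0 ∨ lut = pvLut1) (v : Int)
    (hv0 : 0 ≤ v) (hv1 : v < 16) :
    0 ≤ PySem.List.pyGetD lut v 0 ∧ PySem.List.pyGetD lut v 0 < 16 := by
  rcases hl with h | h <;> subst h <;> interval_cases v <;> decide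

theorem pv_cascade_cases (lut : List Int) (v : Int) :
    pvCascade lut v = pvLut0 ∨ pvCascade lut v = pvLut1 := by
  unfold pvCascade
  exact Or.symm (ite_eq_or_eq _ pvLut1 pvLut0)

-- empty ranges
theorem pv_pyRange_nonpos (b : Int) (hb : b ≤ 0) : PySem.List.pyRange 0 b 1 = [] := by
  apply List.eq_nil_iff_forall_not_mem.2
  intro x hx
  have := (PySem.List.mem_pyRange_one (a := 0) (b := b) (x := x)).1 hx
  omega

-- main loop invariant: after k steps, A's (key, lut, out) is determined by
-- states[k] of B's stage-1 scan, and out equals k steps of B's stage 2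
set_option maxHeartbeats 2000000 in
theorem pv_main (chl rsp : List Int) (n : Nat) (hn : n ≤ chl.length) :
    ∀ k : Nat, k ≤ n →
      (PySem.List.pyRange 0 (k : Int) 1).foldl (pvStepA chl) (0xB, pvLut0, rsp)
        = (PySem.Int.band (((0xB : Int) :: pvScan 0xB (chl.take n)).getD k 0) 15,
           (if ((0xB : Int) :: pvScan 0xB (chl.take n)).getD k 0 < 16 then pvLut0 else pvLut1),
           (PySem.List.pyRange 0 (k : Int) 1).foldl
             (pvStep2 chl ((0xB : Int) :: pvScan 0xB (chl.take n))) rsp)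
      ∧ 0 ≤ ((0xB : Int) :: pvScan 0xB (chl.take n)).getD k 0
      ∧ ((0xB : Int) :: pvScan 0xB (chl.take n)).getD k 0 < 32 := by
  set states := ((0xB : Int) :: pvScan 0xB (chl.take n)) with hstates
  intro k
  induction k with
  | zero =>
    intro _
    have h0 : PySem.List.pyRange 0 ((0 : Nat) : Int) 1 = [] := by
      rw [Nat.cast_zero]; exact pv_pyRange_nonpos 0 le_rfl
    refine ⟨?_, by simp [hstates], by simp [hstates]⟩
    rw [h0]
    simp only [List.foldl_nil, hstates, List.getD_cons_zero]
    norm_num [show PySem.Int.band 11 15 = 11 from by decide]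
  | succ k ih =>
    intro hk1
    obtain ⟨hfold, hs0, hs1⟩ := ih (Nat.le_of_succ_le hk1)
    set s := states.getD k 0 with hs
    have hklen : k < (chl.take n).length := by
      rw [List.length_take]; omega
    have hrange : PySem.List.pyRange 0 ((k + 1 : Nat) : Int) 1
        = PySem.List.pyRange 0 (k : Int) 1 ++ [(k : Int)] := by
      push_cast
      exact PySem.List.pyRange_one_succ_right (by omega)
    -- the next state via the table
    have hget : (chl.take n).getD k 0 = chl.getD k 0 := by
      have hkn : k < n := by omega
      rw [List.getD_eq_getElem?_getD, List.getD_eq_getElem?_getD]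
      congr 1
      simp [hkn]
    have hsk1 : states.getD (k + 1) 0 = pvF s ((chl.take n).getD k 0) := by
      rw [hstates]
      exact pvScan_getD_succ (chl.take n) 0xB k hklen
    set x := chl.getD k 0 with hx
    have hbx0 : 0 ≤ PySem.Int.band x 15 := by rw [pv_band15]; omega
    have hbx1 : PySem.Int.band x 15 < 16 := by rw [pv_band15]; omega
    have htbl := pv_tbl s (PySem.Int.band x 15) hs0 hs1 hbx0 hbx1
    -- A's nibble at step k equals B's
    set v := PySem.Int.band (s + 5 * x) 15 with hv
    have hv' : PySem.Int.band (s + 5 * PySem.Int.band x 15) 15 = v := (pv_band15_shift s x).symm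
    have hvkey : PySem.Int.band (PySem.Int.band s 15 + 5 * x) 15 = v := by
      rw [hv]; simp only [pv_band15]; omega
    have hv0 : 0 ≤ v := by rw [hv, pv_band15]; omega
    have hv16 : v < 16 := by rw [hv, pv_band15]; omega
    rw [hv'] at htbl
    have hsk1' : states.getD (k + 1) 0
        = (if pvCascade (if s < 16 then pvLut0 else pvLut1) v = pvLut1 then 16 else 0)
          + PySem.List.pyGetD (if s < 16 then pvLut0 else pvLut1) v 0 := by
      rw [hsk1, hget]
      exact htbl
    have hlor : (if s < 16 then pvLut0 else pvLut1) = pvLut0 ∨ (if s < 16 then pvLut0 else pvLut1) = pvLut1 := by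
      by_cases h : s < 16
      · exact Or.inl (if_pos h)
      · exact Or.inr (if_neg h)
    have hkey := pv_lut_bounds (if s < 16 then pvLut0 else pvLut1) hlor v hv0 hv16
    have hcasc := pv_cascade_cases (if s < 16 then pvLut0 else pvLut1) v
    refine ⟨?_, ?_, ?_⟩
    · rw [hrange, List.foldl_append, List.foldl_append, hfold, List.foldl_cons, List.foldl_cons,
          List.foldl_nil, List.foldl_nil]
      simp only [pvStepA, pvStep2]
      rw [show PySem.List.pyGetD chl (k : Int) 0 = x by simp [hx],
          show PySem.List.pyGetD states (k : Int) 0 = s by simp [hs]]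
      rw [hvkey, ← hv]
      have hb1 : ∀ g : Int, 0 ≤ g → g < 16 → PySem.Int.band (16 + g) 15 = g := by
        intro g h1 h2; rw [pv_band15]; omega
      have hb2 : ∀ g : Int, 0 ≤ g → g < 16 → PySem.Int.band g 15 = g := by
        intro g h1 h2; rw [pv_band15]; omega
      rcases hcasc with h | h
      · -- next lut is lut0: the new state is just the new key
        have h16 : states.getD (k + 1) 0
            = PySem.List.pyGetD (if s < 16 then pvLut0 else pvLut1) v 0 := by
          rw [hsk1', h, if_neg (show ¬(pvLut0 = pvLut1) by decide), zero_add]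
        refine Prod.ext ?_ (Prod.ext ?_ rfl)
        · show PySem.List.pyGetD (if s < 16 then pvLut0 else pvLut1) v 0
              = PySem.Int.band (states.getD (k + 1) 0) 15
          rw [h16, hb2 _ hkey.1 hkey.2]
        · show pvCascade (if s < 16 then pvLut0 else pvLut1) v
              = (if states.getD (k + 1) 0 < 16 then pvLut0 else pvLut1)
          rw [h16, if_pos hkey.2, h]
      · -- next lut is lut1: the new state carries the 16 bit
        have h16 : states.getD (k + 1) 0
            = 16 + PySem.List.pyGetD (if s < 16 then pvLut0 else pvLut1) v 0 := by
          rw [hsk1', h, if_pos (show (pvLut1 : List Int) = pvLut1 from rfl)]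
        refine Prod.ext ?_ (Prod.ext ?_ rfl)
        · show PySem.List.pyGetD (if s < 16 then pvLut0 else pvLut1) v 0
              = PySem.Int.band (states.getD (k + 1) 0) 15
          rw [h16, hb1 _ hkey.1 hkey.2]
        · show pvCascade (if s < 16 then pvLut0 else pvLut1) v
              = (if states.getD (k + 1) 0 < 16 then pvLut0 else pvLut1)
          rw [h16, if_neg (show ¬(16 + PySem.List.pyGetD (if s < 16 then pvLut0 else pvLut1) v 0 < 16) by omega), h]
    · rw [hsk1']
      rcases hcasc with h | h
      · rw [h, if_neg (show ¬(pvLut0 = pvLut1) by decide)]; omega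
      · rw [h, if_pos (show (pvLut1 : List Int) = pvLut1 from rfl)]; omega
    · rw [hsk1']
      rcases hcasc with h | h
      · rw [h, if_neg (show ¬(pvLut0 = pvLut1) by decide)]; omega
      · rw [h, if_pos (show (pvLut1 : List Int) = pvLut1 from rfl)]; omega

-- ===== VERDICT (by name: the statement is the Claim_ definition above) =====
theorem generate_cic_result_py_spec : Claim_equal_generate_cic_result_py := by
  intro chl rsp list_len _ hpre
  unfold Spec_generate_cic_result_py generate_cic_result_py generate_cic_result_py_alt
  by_cases hneg : list_len ≤ 0
  · rw [pv_pyRange_nonpos list_len hneg]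
    rfl
  · obtain ⟨hc, _⟩ := hpre
    set n := list_len.toNat with hnn
    have hln : list_len = (n : Int) := by simp only [hnn]; omega
    have hnlen : n ≤ chl.length := by omega
    have hslice : PySem.List.slice chl none (some list_len) = chl.take n := by
      rw [hln]; exact_mod_cast PySem.List.slice_to_natCast chl n
    have hstates : (PySem.List.slice chl none (some list_len)).foldl pvStepScan [0xB]
        = (0xB : Int) :: pvScan 0xB (chl.take n) := by
      rw [hslice, pv_foldl_scan _ [0xB] (by simp)]
      rfl
    rw [hstates, hln, (pv_main chl rsp n hnlen n le_rfl).1]
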